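-- pv_equiv track=rewrite | github.com/mdrishab/PTG | fractionable_api-master@40ee099f0e9/app.py | entity_position_extractor
-- ===== SOURCE A (Python) =====
-- def entity_position_extractor(working_dates_info, company_info, company_loc_info, designation_info):
--     range_dictionary = {}
--     working_date_end_indices = [x[1] for x in working_dates_info]
--     working_date_end_indices_sort = sorted(working_date_end_indices, reverse=False)
--     for index, info in enumerate([company_info, company_loc_info, designation_info]):
--         if index == 0:
--             entity_info = "company_info"
--         elif index == 1:
--             entity_info = "company_loc_info"
--         else:
--             entity_info = "designation_info"
--         if len(info) > 0:
--             info = [x[1] for x in info]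
--             info = sorted(info, reverse=True)
--             overlapping_info_in_positive_range = []
--             overlapping_info_in_negative_range = []
--             for end_index in working_date_end_indices_sort:
--                 overlapping_info_in_positive_range.extend([end for end in info if end in range(end_index, end_index+200)])
--                 overlapping_info_in_negative_range.extend([end for end in info if end in range(end_index-200, end_index)])
--             overlapping_info_in_positive_range = list(set(overlapping_info_in_positive_range))
--             overlapping_info_in_negative_range = list(set(overlapping_info_in_negative_range))
--             # overlapping_info_in_positive_range.extend([end for end in info if end in range(working_date_end_indices_sort[-1], (working_date_end_indices_sort[-1]+200))])
--             # overlapping_info_in_negative_range.extend([end for end in info if end in range((working_date_end_indices_sort[-1]-200), working_date_end_indices_sort[-1])])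
--             if len(overlapping_info_in_positive_range) > len(overlapping_info_in_negative_range):
--                 range_dictionary[entity_info] = 200
--             elif len(overlapping_info_in_positive_range) < len(overlapping_info_in_negative_range):
--                 range_dictionary[entity_info] = -200
--             elif len(overlapping_info_in_positive_range) == 0 and len(overlapping_info_in_negative_range) == 0:
--                 range_dictionary[entity_info] = 0
--             else:
--                 range_dictionary[entity_info] = -200
--         else:
--             range_dictionary[entity_info] = 0
--     return range_dictionary
-- ===== SOURCE B (Python) =====
-- def _lb(ends, lo, a, b):
--     # least index i in [a, b) with ends[i] >= lo (= b if none); ends sorted ascending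
--     if a >= b:
--         return a
--     m = (a + b) // 2
--     if ends[m] < lo:
--         return _lb(ends, lo, m + 1, b)
--     return _lb(ends, lo, a, m)
--
--
-- def _has_in(ends, lo, hi):
--     # ends sorted ascending: is there an element e with lo <= e <= hi?
--     i = _lb(ends, lo, 0, len(ends))
--     return i < len(ends) and ends[i] <= hi
--
--
-- def entity_position_extractor(working_dates_info, company_info, company_loc_info, designation_info):
--     ends = sorted(e for _, e in working_dates_info)
--     result = {}
--     for name, info in (("company_info", company_info),
--                        ("company_loc_info", company_loc_info),
--                        ("designation_info", designation_info)):
--         if not info: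
--             result[name] = 0
--             continue
--         pos = neg = 0
--         for v in {e for _, e in info}:
--             if _has_in(ends, v - 199, v):
--                 pos += 1
--             if _has_in(ends, v + 1, v + 200):
--                 neg += 1
--         if pos > neg:
--             result[name] = 200
--         elif pos == 0 and neg == 0:
--             result[name] = 0
--         else:
--             result[name] = -200
--     return result
-- ===== Notes on version B (the rewrite author's own statement) =====
-- stated objective: faster
-- what changed: Instead of scanning every info end for every working end and deduplicating the collected overlap lists with set(), B iterates once over the distinct info ends and binary-searches the sorted working ends for a neighbour within the +/-200 window, counting directly.
import Mathlib
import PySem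

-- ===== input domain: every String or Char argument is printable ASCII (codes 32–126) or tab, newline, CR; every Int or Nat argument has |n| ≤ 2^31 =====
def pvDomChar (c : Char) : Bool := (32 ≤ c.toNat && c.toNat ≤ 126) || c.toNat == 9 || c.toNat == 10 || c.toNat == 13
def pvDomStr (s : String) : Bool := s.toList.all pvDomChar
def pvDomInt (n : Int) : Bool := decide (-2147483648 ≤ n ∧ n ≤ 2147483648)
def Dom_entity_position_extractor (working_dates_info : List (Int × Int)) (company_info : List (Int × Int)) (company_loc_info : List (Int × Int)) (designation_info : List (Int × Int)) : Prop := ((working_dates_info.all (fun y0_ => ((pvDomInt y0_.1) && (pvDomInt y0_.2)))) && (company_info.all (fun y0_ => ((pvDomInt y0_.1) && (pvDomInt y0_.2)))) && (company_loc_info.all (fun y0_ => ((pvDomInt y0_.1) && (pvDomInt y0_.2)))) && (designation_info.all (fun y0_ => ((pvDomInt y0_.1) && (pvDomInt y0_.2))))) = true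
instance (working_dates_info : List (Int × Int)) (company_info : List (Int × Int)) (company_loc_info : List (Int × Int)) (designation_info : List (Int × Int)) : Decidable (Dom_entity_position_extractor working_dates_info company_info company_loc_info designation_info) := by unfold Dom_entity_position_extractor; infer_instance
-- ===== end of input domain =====

-- ===== PORT A =====
-- B replaces A's per-working-end scan of all info ends (then set() dedup) by one pass over the
-- distinct info ends with a binary search in the sorted working ends; equal return value proved.

-- helper for A: the body of A's per-entity branch ('v in range(a, b)' on ints is exactly a <= v < b)
def pvAEntity (sortedW : List Int) (info : List (Int × Int)) : Int :=
  if info.length > 0 then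
    let infoS := PySem.List.sorted (info.map (·.2)) (fun x => x) true
    let pn := sortedW.foldl (fun (acc : List Int × List Int) e =>
        (acc.1 ++ infoS.filter (fun v => decide (e ≤ v) && decide (v < e + 200)),
         acc.2 ++ infoS.filter (fun v => decide (e - 200 ≤ v) && decide (v < e)))) ([], [])
    let posS : PySem.Set Int := PySem.Set.ofList pn.1
    let negS : PySem.Set Int := PySem.Set.ofList pn.2
    if posS.length > negS.length then 200
    else if posS.length < negS.length then -200
    else if posS.length = 0 ∧ negS.length = 0 then 0
    else -200
  else 0

def entity_position_extractor (working_dates_info : List (Int × Int)) (company_info : List (Int × Int)) (company_loc_info : List (Int × Int)) (designation_info : List (Int × Int)) : List (String × Int) :=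
  let working_date_end_indices := working_dates_info.map (·.2)
  let working_date_end_indices_sort := PySem.List.sorted working_date_end_indices (fun x => x) false
  ((PySem.List.enumerate [company_info, company_loc_info, designation_info] 0).foldl
    (fun (d : PySem.Dict String Int) p =>
      let entity_info := if p.1 = 0 then "company_info"
                         else if p.1 = 1 then "company_loc_info"
                         else "designation_info"
      d.insert entity_info (pvAEntity working_date_end_indices_sort p.2))
    PySem.Dict.empty).items

-- ===== PORT B =====
-- least index i in [a, b) with ends[i] >= lo (b if none); every recursive call keeps m < b <= len,
-- so the pyGetD default 0 is never the value Python's ends[m] would raise on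
def pvLB (ends : List Int) (lo : Int) (a b : Nat) : Nat :=
  if a ≥ b then a
  else
    let m := (a + b) / 2
    if PySem.List.pyGetD ends (m : Int) 0 < lo then pvLB ends lo (m + 1) b
    else pvLB ends lo a m
termination_by b - a
decreasing_by all_goals omega

def pvHasIn (ends : List Int) (lo hi : Int) : Bool :=
  let i := pvLB ends lo 0 ends.length
  decide (i < ends.length) && decide (PySem.List.pyGetD ends (i : Int) 0 ≤ hi)

def pvBEntity (ends : List Int) (info : List (Int × Int)) : Int :=
  if info = [] then 0
  else
    let vs : PySem.Set Int := PySem.Set.ofList (info.map (·.2))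
    let pn := vs.foldl (fun (pn : Int × Int) v =>
        (if pvHasIn ends (v - 199) v then pn.1 + 1 else pn.1,
         if pvHasIn ends (v + 1) (v + 200) then pn.2 + 1 else pn.2)) ((0 : Int), (0 : Int))
    if pn.1 > pn.2 then 200
    else if pn.1 = 0 ∧ pn.2 = 0 then 0
    else -200

def entity_position_extractor_alt (working_dates_info : List (Int × Int)) (company_info : List (Int × Int)) (company_loc_info : List (Int × Int)) (designation_info : List (Int × Int)) : List (String × Int) :=
  let ends := PySem.List.sorted (working_dates_info.map (·.2)) (fun x => x) false
  [("company_info", pvBEntity ends company_info),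
   ("company_loc_info", pvBEntity ends company_loc_info),
   ("designation_info", pvBEntity ends designation_info)]

-- ===== PRECONDITION & SPEC =====
def Spec_entity_position_extractor (working_dates_info : List (Int × Int)) (company_info : List (Int × Int)) (company_loc_info : List (Int × Int)) (designation_info : List (Int × Int)) (out : List (String × Int)) : Prop := out = entity_position_extractor_alt working_dates_info company_info company_loc_info designation_info
instance (working_dates_info : List (Int × Int)) (company_info : List (Int × Int)) (company_loc_info : List (Int × Int)) (designation_info : List (Int × Int)) (out : List (String × Int)) : Decidable (Spec_entity_position_extractor working_dates_info company_info company_loc_info designation_info out) := by unfold Spec_entity_position_extractor; infer_instance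

-- ===== CLAIM (what is proved, stated in full; the proofs are below) =====
def Claim_equal_entity_position_extractor : Prop := ∀ (working_dates_info : List (Int × Int)) (company_info : List (Int × Int)) (company_loc_info : List (Int × Int)) (designation_info : List (Int × Int)), Dom_entity_position_extractor working_dates_info company_info company_loc_info designation_info → Spec_entity_position_extractor working_dates_info company_info company_loc_info designation_info (entity_position_extractor working_dates_info company_info company_loc_info designation_info)

-- ===== LEMMAS AND PROOFS =====

lemma pvMono (ends : List Int) (hs : List.Pairwise (· ≤ ·) ends) :
    ∀ (i j : Nat) (hi : i < ends.length) (hj : j < ends.length), i ≤ j → ends[i] ≤ ends[j] := by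
  intro i j hi hj hij
  rcases Nat.eq_or_lt_of_le hij with rfl | h
  · exact le_refl _
  · exact List.pairwise_iff_getElem.mp hs i j hi hj h

lemma pvLB_spec (ends : List Int) (hs : List.Pairwise (· ≤ ·) ends) (lo : Int) :
    ∀ (n a b : Nat), b - a = n → a ≤ b → b ≤ ends.length →
    (∀ (j : Nat) (hj : j < ends.length), j < a → ends[j] < lo) →
    (∀ (j : Nat) (hj : j < ends.length), b ≤ j → lo ≤ ends[j]) →
    (∀ (j : Nat) (hj : j < ends.length), j < pvLB ends lo a b → ends[j] < lo) ∧
    (∀ (j : Nat) (hj : j < ends.length), pvLB ends lo a b ≤ j → lo ≤ ends[j]) := by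
  intro n
  induction n using Nat.strong_induction_on with
  | _ n ih =>
    intro a b hn hab hblen ha hb
    rw [pvLB]
    by_cases hge : a ≥ b
    · simp only [hge, if_true]
      have hab' : a = b := Nat.le_antisymm hab hge
      exact ⟨ha, fun j hj hj2 => hb j hj (hab' ▸ hj2)⟩
    · simp only [hge, if_false]
      have halt : a < b := Nat.lt_of_not_le hge
      have hmlt : (a + b) / 2 < b := by omega
      have hmge : a ≤ (a + b) / 2 := by omega
      have hmlen : (a + b) / 2 < ends.length := by omega
      have hget : PySem.List.pyGetD ends (((a + b) / 2 : Nat) : Int) 0 = ends[(a + b) / 2] := by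
        rw [PySem.List.pyGetD_natCast]
        exact List.getD_eq_getElem ends 0 hmlen
      by_cases hlt : PySem.List.pyGetD ends (((a + b) / 2 : Nat) : Int) 0 < lo
      · simp only [hlt, if_true]
        refine ih (b - ((a + b) / 2 + 1)) (by omega) ((a + b) / 2 + 1) b rfl (by omega) hblen ?_ hb
        intro j hj hjlt
        calc ends[j] ≤ ends[(a + b) / 2] := pvMono ends hs j _ hj hmlen (by omega)
        _ < lo := by rw [← hget]; exact hlt
      · simp only [hlt, if_false]
        refine ih ((a + b) / 2 - a) (by omega) a ((a + b) / 2) rfl hmge (by omega) ha ?_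
        intro j hj hjge
        calc lo ≤ ends[(a + b) / 2] := by rw [← hget]; exact not_lt.mp hlt
        _ ≤ ends[j] := pvMono ends hs _ j hmlen hj hjge

lemma pvHasIn_iff (ends : List Int) (hs : List.Pairwise (· ≤ ·) ends) (lo hi : Int) :
    pvHasIn ends lo hi = true ↔ ∃ e ∈ ends, lo ≤ e ∧ e ≤ hi := by
  obtain ⟨h1, h2⟩ := pvLB_spec ends hs lo (ends.length - 0) 0 ends.length rfl (Nat.zero_le _)
    (le_refl _) (by omega) (by intro j hj hj2; omega)
  unfold pvHasIn
  set i := pvLB ends lo 0 ends.length with hi_def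
  constructor
  · intro h
    simp only [Bool.and_eq_true, decide_eq_true_eq] at h
    obtain ⟨hilt, hle⟩ := h
    refine ⟨ends[i], List.getElem_mem hilt, h2 i hilt (le_refl _), ?_⟩
    rw [PySem.List.pyGetD_natCast, List.getD_eq_getElem ends 0 hilt] at hle
    exact hle
  · rintro ⟨e, he, hloe, hehi⟩
    obtain ⟨j, hj, rfl⟩ := List.mem_iff_getElem.mp he
    have hji : i ≤ j := by
      by_contra hx
      exact absurd hloe (not_le.mpr (h1 j hj (by omega)))
    have hilt : i < ends.length := lt_of_le_of_lt hji hj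
    simp only [Bool.and_eq_true, decide_eq_true_eq]
    refine ⟨hilt, ?_⟩
    rw [PySem.List.pyGetD_natCast, List.getD_eq_getElem ends 0 hilt]
    exact le_trans (pvMono ends hs i j hilt hj hji) hehi

-- a deduplicated collected list counts a predicate over any nodup list with the same membership law
lemma pvLenOfListEqCountP (L S : List Int) (p : Int → Bool) (hS : S.Nodup)
    (h : ∀ v, v ∈ L ↔ v ∈ S ∧ p v = true) :
    (PySem.Set.ofList L).length = S.countP p := by
  rw [← List.toFinset_card_of_nodup (PySem.Set.nodup_ofList L),
      List.countP_eq_length_filter, ← List.toFinset_card_of_nodup (hS.filter p)]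
  congr 1
  ext v
  simp only [List.mem_toFinset, PySem.Set.mem_ofList, h v, List.mem_filter]

lemma pvEntityEq (sortedW : List Int) (hW : List.Pairwise (· ≤ ·) sortedW)
    (info : List (Int × Int)) : pvAEntity sortedW info = pvBEntity sortedW info := by
  by_cases hinfo : info = []
  · simp [pvAEntity, pvBEntity, hinfo]
  · have hlen : info.length > 0 := List.length_pos_iff.mpr hinfo
    unfold pvAEntity pvBEntity
    simp only [hinfo, if_false, if_pos hlen]
    rw [PySem.List.foldl_prod_mk
        (f := fun (acc : List Int) e => acc ++ (PySem.List.sorted (info.map (·.2)) (fun x => x) true).filter (fun v => decide (e ≤ v) && decide (v < e + 200)))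
        (g := fun (acc : List Int) e => acc ++ (PySem.List.sorted (info.map (·.2)) (fun x => x) true).filter (fun v => decide (e - 200 ≤ v) && decide (v < e))),
      PySem.List.foldl_prod_mk
        (f := fun (acc : Int) v => if pvHasIn sortedW (v - 199) v then acc + 1 else acc)
        (g := fun (acc : Int) v => if pvHasIn sortedW (v + 1) (v + 200) then acc + 1 else acc)]
    rw [PySem.List.foldl_append_eq_flatMap, PySem.List.foldl_append_eq_flatMap]
    rw [PySem.List.foldl_if_add_one (p := fun v => pvHasIn sortedW (v - 199) v),
        PySem.List.foldl_if_add_one (p := fun v => pvHasIn sortedW (v + 1) (v + 200))]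
    simp only [List.nil_append, zero_add]
    have hpos : (PySem.Set.ofList
        (sortedW.flatMap (fun e => (PySem.List.sorted (info.map (·.2)) (fun x => x) true).filter (fun v => decide (e ≤ v) && decide (v < e + 200))))).length
        = (PySem.Set.ofList (info.map (·.2))).countP (fun v => pvHasIn sortedW (v - 199) v) := by
      apply pvLenOfListEqCountP _ _ _ (PySem.Set.nodup_ofList _)
      intro v
      simp only [List.mem_flatMap, List.mem_filter, PySem.List.mem_sorted,
        PySem.Set.mem_ofList, Bool.and_eq_true, decide_eq_true_eq,
        pvHasIn_iff sortedW hW]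
      constructor
      · rintro ⟨e, he, hv, h1, h2⟩
        exact ⟨hv, e, he, by omega, by omega⟩
      · rintro ⟨hv, e, he, h1, h2⟩
        exact ⟨e, he, hv, by omega, by omega⟩
    have hneg : (PySem.Set.ofList
        (sortedW.flatMap (fun e => (PySem.List.sorted (info.map (·.2)) (fun x => x) true).filter (fun v => decide (e - 200 ≤ v) && decide (v < e))))).length
        = (PySem.Set.ofList (info.map (·.2))).countP (fun v => pvHasIn sortedW (v + 1) (v + 200)) := by
      apply pvLenOfListEqCountP _ _ _ (PySem.Set.nodup_ofList _)
      intro v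
      simp only [List.mem_flatMap, List.mem_filter, PySem.List.mem_sorted,
        PySem.Set.mem_ofList, Bool.and_eq_true, decide_eq_true_eq,
        pvHasIn_iff sortedW hW]
      constructor
      · rintro ⟨e, he, hv, h1, h2⟩
        exact ⟨hv, e, he, by omega, by omega⟩
      · rintro ⟨hv, e, he, h1, h2⟩
        exact ⟨e, he, hv, by omega, by omega⟩
    split_ifs <;> omega

lemma pvTopEq (working_dates_info company_info company_loc_info designation_info : List (Int × Int)) :
    entity_position_extractor working_dates_info company_info company_loc_info designation_info
    = entity_position_extractor_alt working_dates_info company_info company_loc_info designation_info := by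
  unfold entity_position_extractor entity_position_extractor_alt
  have hW := PySem.List.sorted_pairwise (working_dates_info.map (·.2)) (fun x => x)
  simp only [PySem.List.enumerate, List.foldl]
  norm_num [PySem.Dict.insert, PySem.Dict.empty, PySem.Dict.items, PySem.Dict.contains_insert, PySem.Dict.contains_empty]
  simp [pvEntityEq _ hW]

-- ===== VERDICT (by name: the statement is the Claim_ definition above) =====
theorem entity_position_extractor_spec : Claim_equal_entity_position_extractor := by
  intro w c l d _
  unfold Spec_entity_position_extractor
  exact pvTopEq w c l d
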